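-- pv_equiv track=rewrite | github.com/DolphinLong/dersdagitimprogrami | algorithms/solution_validator.py | _is_block_fragmented
-- ===== SOURCE A (Python) =====
-- from typing import Any, Dict, List, Optional, Set, Tuple
--
-- def _is_block_fragmented(time_slots: List[Tuple[int, int]]) -> bool:
--     """
--     Check if a block is fragmented (not in consecutive slots)
--
--     Args:
--         time_slots: List of (day, slot) tuples
--
--     Returns:
--         True if block is fragmented
--     """
--     if len(time_slots) <= 1:
--         return False
--
--     # Sort slots
--     sorted_slots = sorted(time_slots)
--
--     # Check for consecutive slots within same day
--     for i in range(len(sorted_slots) - 1):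
--         current_day, current_slot = sorted_slots[i]
--         next_day, next_slot = sorted_slots[i + 1]
--
--         # If same day, slots should be consecutive
--         if current_day == next_day:
--             if next_slot != current_slot + 1:
--                 return True  # Gap in same day
--         else:
--             # Different days - check if it's a valid cross-day pattern
--             # For now, consider cross-day blocks as potentially fragmented
--             # This could be enhanced based on specific school policies
--             pass
--
--     return False
-- ===== SOURCE B (Python) =====
-- from typing import List, Tuple
--
-- def _is_block_fragmented(time_slots: List[Tuple[int, int]]) -> bool:
--     """True if some day's slots are not one consecutive run."""
--     if len(time_slots) <= 1:
--         return False
--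
--     # Group slots by day in one pass.
--     by_day = {}
--     for day, slot in time_slots:
--         by_day.setdefault(day, []).append(slot)
--
--     # A day's block is contiguous iff its sorted slots step by exactly 1
--     # (this also flags duplicate slots on the same day).
--     for slots in by_day.values():
--         ordered = sorted(slots)
--         for cur, nxt in zip(ordered, ordered[1:]):
--             if nxt != cur + 1:
--                 return True
--     return False
-- ===== Notes on version B (the rewrite author's own statement) =====
-- stated objective: alternative
-- what changed: Instead of lexicographically sorting the whole (day, slot) list and scanning adjacent pairs while skipping day boundaries, B groups slots by day into a dict in one pass and checks each day's sorted slot list for a non-unit step.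
import Mathlib
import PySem

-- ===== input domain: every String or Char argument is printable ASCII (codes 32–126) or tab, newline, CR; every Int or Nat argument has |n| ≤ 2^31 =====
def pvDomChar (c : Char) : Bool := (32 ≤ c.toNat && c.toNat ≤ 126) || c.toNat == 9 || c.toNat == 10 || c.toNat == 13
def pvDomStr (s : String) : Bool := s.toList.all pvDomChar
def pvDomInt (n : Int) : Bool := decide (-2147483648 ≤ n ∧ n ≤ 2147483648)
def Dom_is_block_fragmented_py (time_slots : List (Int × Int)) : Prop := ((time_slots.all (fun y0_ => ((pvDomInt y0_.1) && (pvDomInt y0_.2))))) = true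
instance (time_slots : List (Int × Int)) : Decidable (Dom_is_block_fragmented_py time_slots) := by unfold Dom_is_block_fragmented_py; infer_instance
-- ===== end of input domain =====

-- B replaces A's whole-list lexicographic sort + boundary-skipping adjacent scan by a dict
-- grouping slots per day and a per-day sorted adjacent-step check (alternative decomposition).

-- ===== PORT A =====
-- the 'for i in range(len-1)' adjacent-pair scan with early return
def aScan : List (Int × Int) → Bool
  | p :: q :: rest => if p.1 == q.1 && !(q.2 == p.2 + 1) then true else aScan (q :: rest)
  | _ => false

def is_block_fragmented_py (time_slots : List (Int × Int)) : Bool :=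
  if time_slots.length ≤ 1 then false
  else aScan (PySem.List.sorted2 time_slots (fun p => p.1) (fun p => p.2))

-- ===== PORT B =====
-- 'for cur, nxt in zip(ordered, ordered[1:]): if nxt != cur + 1: return True'
def gapScan : List Int → Bool
  | a :: b :: rest => if !(b == a + 1) then true else gapScan (b :: rest)
  | _ => false

-- 'for slots in by_day.values(): …' with early return
def valScan : List (List Int) → Bool
  | [] => false
  | g :: rest => if gapScan (PySem.List.sorted g (fun x => x)) then true else valScan rest

def is_block_fragmented_py_alt (time_slots : List (Int × Int)) : Bool :=
  if time_slots.length ≤ 1 then false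
  else
    let by_day := time_slots.foldl
      (fun d p => d.modify p.1 ([] : List Int) (fun l => l ++ [p.2])) PySem.Dict.empty
    valScan by_day.values

-- ===== PRECONDITION & SPEC =====
def Spec_is_block_fragmented_py (time_slots : List (Int × Int)) (out : Bool) : Prop := out = is_block_fragmented_py_alt time_slots
instance (time_slots : List (Int × Int)) (out : Bool) : Decidable (Spec_is_block_fragmented_py time_slots out) := by unfold Spec_is_block_fragmented_py; infer_instance

-- ===== CLAIM (what is proved, stated in full; the proofs are below) =====
def Claim_equal_is_block_fragmented_py : Prop := ∀ (time_slots : List (Int × Int)), Dom_is_block_fragmented_py time_slots → Spec_is_block_fragmented_py time_slots (is_block_fragmented_py time_slots)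

-- ===== LEMMAS AND PROOFS =====

-- slots of day d, in list order
def slotsOf (ts : List (Int × Int)) (d : Int) : List Int :=
  (ts.filter (fun p => p.1 == d)).map (fun p => p.2)

-- the distinct days in first-occurrence order
def daysOf (ts : List (Int × Int)) : List Int := PySem.Set.ofList (ts.map (fun p => p.1))

-- the lexicographically sorted list, rebuilt day block by day block
def canon (ts : List (Int × Int)) : List (Int × Int) :=
  (PySem.List.sorted (daysOf ts) (fun x => x)).flatMap
    (fun d => (PySem.List.sorted (slotsOf ts d) (fun x => x)).map (fun s => (d, s)))

theorem prod_beq (d s : Int) (q : Int × Int) : ((d, s) == q) = (d == q.1 && s == q.2) := by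
  cases q; rw [Bool.eq_iff_iff]; simp [Prod.ext_iff]

theorem count_map_pair (q : Int × Int) (d : Int) (m : List Int) :
    List.count q (m.map (fun s => (d, s))) = if q.1 = d then List.count q.2 m else 0 := by
  induction m with
  | nil => simp
  | cons s m ih =>
      simp only [List.map_cons, List.count_cons, ih, prod_beq]
      by_cases h1 : q.1 = d <;> by_cases h2 : s = q.2 <;> simp [h1, h2] <;> omega

theorem count_slots (ts : List (Int × Int)) (q : Int × Int) :
    List.count q.2 (slotsOf ts q.1) = List.count q ts := by
  unfold slotsOf
  rw [List.count_eq_countP, List.count_eq_countP, List.countP_map, List.countP_filter]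
  apply List.countP_congr
  intro p _
  cases p; cases q
  rw [Bool.eq_iff_iff]
  simp only [Function.comp_apply, Bool.and_eq_true, beq_iff_eq, Prod.mk.injEq]
  tauto

theorem sum_if_mem (x : Int) (c : Nat) :
    ∀ l : List Int, l.Nodup → (l.map (fun d => if x = d then c else 0)).sum
      = if x ∈ l then c else 0 := by
  intro l hnd
  induction l with
  | nil => simp
  | cons d l ih =>
      rcases List.nodup_cons.mp hnd with ⟨hd, hl⟩
      by_cases h : x = d
      · subst h
        simp [ih hl, hd]
      · simp [h, ih hl]

theorem canon_perm (ts : List (Int × Int)) : (canon ts).Perm ts := by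
  rw [List.perm_iff_count]
  intro q
  unfold canon
  rw [List.count_flatMap]
  have hmap : ∀ d : Int,
      (List.count q ∘ fun d => (PySem.List.sorted (slotsOf ts d) (fun x => x)).map
        (fun s => (d, s))) d = if q.1 = d then List.count q ts else 0 := by
    intro d
    simp only [Function.comp_apply]
    rw [count_map_pair]
    by_cases h : q.1 = d
    · subst h
      rw [if_pos rfl, if_pos rfl, (PySem.List.sorted_perm _ _ _).count_eq, count_slots]
    · rw [if_neg h, if_neg h]
  rw [List.map_congr_left (fun d _ => hmap d)]
  have hnd : (PySem.List.sorted (daysOf ts) (fun x => x)).Nodup :=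
    (PySem.List.sorted_perm _ _ _).nodup_iff.mpr (PySem.Set.nodup_ofList _)
  rw [sum_if_mem _ _ _ hnd]
  by_cases h : q.1 ∈ PySem.List.sorted (daysOf ts) (fun x => x)
  · rw [if_pos h]
  · rw [if_neg h]
    symm
    rw [List.count_eq_zero]
    intro hq
    exact h ((PySem.List.mem_sorted _ _ _ _).mpr
      ((PySem.Set.mem_ofList _ _).mpr (List.mem_map.mpr ⟨q, hq, rfl⟩)))

theorem canon_pairwise (ts : List (Int × Int)) :
    (canon ts).Pairwise (fun a b => toLex a ≤ toLex b) := by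
  unfold canon
  rw [List.pairwise_flatMap]
  constructor
  · intro d _
    rw [List.pairwise_map]
    refine (PySem.List.sorted_pairwise (slotsOf ts d) (fun x => x)).imp ?_
    intro s1 s2 h
    exact Prod.Lex.le_iff.mpr (Or.inr ⟨rfl, h⟩)
  · refine (PySem.List.sorted_ofList_pairwise_lt (ts.map (fun p => p.1))).imp ?_
    intro d1 d2 h x hx y hy
    rcases List.mem_map.mp hx with ⟨s1, _, rfl⟩
    rcases List.mem_map.mp hy with ⟨s2, _, rfl⟩
    exact Prod.Lex.le_iff.mpr (Or.inl h)

theorem lt_bool_eq (a b : Int × Int) :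
    (decide (a.1 < b.1) || (!decide (b.1 < a.1) && decide (a.2 < b.2)))
      = decide ((toLex a : Lex (Int × Int)) < toLex b) := by
  rw [Bool.eq_iff_iff]
  simp only [Bool.or_eq_true, Bool.and_eq_true, Bool.not_eq_true', decide_eq_true_iff,
    decide_eq_false_iff_not, Prod.Lex.lt_iff, ofLex_toLex]
  omega

theorem foldl_insertBy_pw {α κ : Type} [LinearOrder κ] (key : α → κ) :
    ∀ (l : List α) (acc : List α), acc.Pairwise (fun a b => key a ≤ key b) →
      (l.foldl (fun acc x =>
        PySem.List.insertBy (fun a b => decide (key a < key b)) x acc) acc).Pairwise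
        (fun a b => key a ≤ key b) := by
  intro l
  induction l with
  | nil => intro acc h; exact h
  | cons x l ih =>
      intro acc h
      exact ih _ (PySem.List.insertBy_pairwise_le key x acc h)

theorem sorted2_eq_canon (ts : List (Int × Int)) :
    PySem.List.sorted2 ts (fun p => p.1) (fun p => p.2) = canon ts := by
  have hunfold : PySem.List.sorted2 ts (fun p => p.1) (fun p => p.2) =
      ts.foldl (fun acc x => PySem.List.insertBy
        (fun a b => decide ((toLex a : Lex (Int × Int)) < toLex b)) x acc) [] := by
    have : (fun (a b : Int × Int) =>
        (decide (a.1 < b.1) || (!decide (b.1 < a.1) && decide (a.2 < b.2))))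
        = fun a b => decide ((toLex a : Lex (Int × Int)) < toLex b) := by
      funext a b; exact lt_bool_eq a b
    show ts.foldl (fun acc x => PySem.List.insertBy
        (fun a b => (decide (a.1 < b.1) || (!decide (b.1 < a.1) && decide (a.2 < b.2)))) x acc) []
      = _
    rw [this]
  have hpw1 : (PySem.List.sorted2 ts (fun p => p.1) (fun p => p.2)).Pairwise
      (fun a b => (toLex a : Lex (Int × Int)) ≤ toLex b) := by
    rw [hunfold]
    exact foldl_insertBy_pw (fun p => (toLex p : Lex (Int × Int))) ts [] List.Pairwise.nil
  have hperm : (PySem.List.sorted2 ts (fun p => p.1) (fun p => p.2)).Perm (canon ts) :=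
    (PySem.List.sorted2_perm ts _ _ false).trans (canon_perm ts).symm
  exact List.eq_of_perm_of_sorted
    (fun a b _ _ h1 h2 => by simpa using le_antisymm h1 h2)
    hpw1 (canon_pairwise ts) hperm

theorem aScan_block (d : Int) :
    ∀ (m : List Int) (rest : List (Int × Int)), (∀ q ∈ rest.head?, q.1 ≠ d) →
      aScan (m.map (fun s => (d, s)) ++ rest) = (gapScan m || aScan rest) := by
  intro m
  induction m with
  | nil => intro rest _; simp [gapScan]
  | cons s m ih =>
      intro rest hrest
      cases m with
      | nil =>
          cases rest with
          | nil => simp [aScan, gapScan]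
          | cons r rs =>
              have hne : r.1 ≠ d := hrest r rfl
              simp only [List.map_cons, List.map_nil, List.nil_append, List.cons_append,
                aScan, gapScan]
              have : (d == r.1) = false := by simp; exact fun h => hne h.symm
              simp [this]
      | cons s2 m2 =>
          by_cases h : s2 = s + 1
          · subst h
            simpa [aScan, gapScan] using ih rest hrest
          · have hne : (s2 == s + 1) = false := by simpa using h
            simp [aScan, gapScan, hne]

theorem aScan_flat (F : Int → List Int) :
    ∀ (ds : List Int), ds.Pairwise (· < ·) →
      aScan (ds.flatMap (fun d => (F d).map (fun s => (d, s))))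
        = ds.any (fun d => gapScan (F d)) := by
  intro ds
  induction ds with
  | nil => intro _; rfl
  | cons d ds ih =>
      intro hpw
      rcases List.pairwise_cons.mp hpw with ⟨hlt, hpw'⟩
      rw [List.flatMap_cons, aScan_block d (F d) _ ?_, ih hpw', List.any_cons]
      intro q hq
      rcases List.mem_flatMap.mp (List.mem_of_mem_head? hq) with ⟨d', hd', hq'⟩
      rcases List.mem_map.mp hq' with ⟨s, _, rfl⟩
      exact fun h => absurd (h ▸ hlt d' hd') (lt_irrefl d)

theorem any_perm {l₁ l₂ : List Int} (f : Int → Bool) (h : l₁.Perm l₂) :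
    l₁.any f = l₂.any f := by
  rw [Bool.eq_iff_iff, List.any_eq_true, List.any_eq_true]
  exact ⟨fun ⟨x, hx, hf⟩ => ⟨x, h.mem_iff.mp hx, hf⟩,
    fun ⟨x, hx, hf⟩ => ⟨x, h.mem_iff.mpr hx, hf⟩⟩

theorem aScan_canon (ts : List (Int × Int)) :
    aScan (canon ts) =
      (daysOf ts).any (fun d => gapScan (PySem.List.sorted (slotsOf ts d) (fun x => x))) := by
  unfold canon daysOf
  rw [aScan_flat (fun d => PySem.List.sorted (slotsOf ts d) (fun x => x)) _
    (PySem.List.sorted_ofList_pairwise_lt (ts.map (fun p => p.1)))]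
  exact any_perm _ (PySem.List.sorted_perm _ _ _)

theorem values_grouping (ts : List (Int × Int)) :
    (ts.foldl (fun d p => d.modify p.1 ([] : List Int) (fun l => l ++ [p.2]))
        PySem.Dict.empty).values = (daysOf ts).map (slotsOf ts) := by
  have hnd : (ts.foldl (fun d p => d.modify p.1 ([] : List Int) (fun l => l ++ [p.2]))
      PySem.Dict.empty).keys.Nodup := by
    exact PySem.Dict.nodup_keys_foldl_modify_key ts (fun p => p.1) []
      (fun _ p => fun l => l ++ [p.2]) PySem.Dict.empty (by simp)
  have hkeys : (ts.foldl (fun d p => d.modify p.1 ([] : List Int) (fun l => l ++ [p.2]))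
      PySem.Dict.empty).keys = daysOf ts := by
    rw [PySem.Dict.keys_foldl_modify_key ts (fun p => p.1) []
      (fun _ p => fun l => l ++ [p.2]) PySem.Dict.empty]
    rfl
  rw [PySem.Dict.values_eq_map_keys _ hnd ([] : List Int), hkeys]
  apply List.map_congr_left
  intro d _
  rw [PySem.Dict.getD_foldl_modify_append ts PySem.Dict.empty d]
  simp [slotsOf]

theorem valScan_eq_any (gs : List (List Int)) :
    valScan gs = gs.any (fun g => gapScan (PySem.List.sorted g (fun x => x))) := by
  induction gs with
  | nil => rfl
  | cons g rest ih => simp only [valScan, ih, List.any_cons]; split <;> simp_all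

-- ===== VERDICT (by name: the statement is the Claim_ definition above) =====
theorem is_block_fragmented_py_spec : Claim_equal_is_block_fragmented_py := by
  intro ts _
  unfold Spec_is_block_fragmented_py is_block_fragmented_py is_block_fragmented_py_alt
  split
  · rfl
  · show aScan _ = valScan _
    rw [sorted2_eq_canon, aScan_canon, values_grouping, valScan_eq_any, List.any_map]
    rfl
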